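-- pv_equiv track=rewrite | github.com/seven-year7/PaperAccept-Agent | app/services/rag_agent_service.py | _select_recent_round_events
-- ===== SOURCE A (Python) =====
-- from typing import Annotated, Any, AsyncGenerator, Dict, List, Sequence, cast
--
-- def _select_recent_round_events(
--     events: List[Dict[str, Any]],
--     rounds: int,
-- ) -> List[Dict[str, Any]]:
--     """选取最近 N 轮 user+assistant 事件用于滚动摘要。"""
--     if rounds <= 0:
--         return []
--     user_count = 0
--     selected_reversed: List[Dict[str, Any]] = []
--     for event in reversed(events):
--         role = str(event.get("role", ""))
--         if role in ("user", "assistant"):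
--             selected_reversed.append(event)
--             if role == "user":
--                 user_count += 1
--                 if user_count >= rounds:
--                     break
--     return list(reversed(selected_reversed))
-- ===== SOURCE B (Python) =====
-- from typing import Any, Dict, List
--
--
-- def _select_recent_round_events(
--     events: List[Dict[str, Any]],
--     rounds: int,
-- ) -> List[Dict[str, Any]]:
--     """Index-table-then-slice: find the start of the Nth-from-last user round, then filter forward."""
--     if rounds <= 0:
--         return []
--     user_idx = [i for i, e in enumerate(events) if str(e.get("role", "")) == "user"]
--     start = user_idx[len(user_idx) - rounds] if len(user_idx) >= rounds else 0
--     return [e for e in events[start:] if str(e.get("role", "")) in ("user", "assistant")]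
-- ===== Notes on version B (the rewrite author's own statement) =====
-- stated objective: alternative
-- what changed: Replaces the reverse scan with an accumulate-and-break threshold by a forward index table of user events, computing the slice start as user_idx[len(user_idx)-rounds] and then filtering events[start:] in natural order.
import Mathlib
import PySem

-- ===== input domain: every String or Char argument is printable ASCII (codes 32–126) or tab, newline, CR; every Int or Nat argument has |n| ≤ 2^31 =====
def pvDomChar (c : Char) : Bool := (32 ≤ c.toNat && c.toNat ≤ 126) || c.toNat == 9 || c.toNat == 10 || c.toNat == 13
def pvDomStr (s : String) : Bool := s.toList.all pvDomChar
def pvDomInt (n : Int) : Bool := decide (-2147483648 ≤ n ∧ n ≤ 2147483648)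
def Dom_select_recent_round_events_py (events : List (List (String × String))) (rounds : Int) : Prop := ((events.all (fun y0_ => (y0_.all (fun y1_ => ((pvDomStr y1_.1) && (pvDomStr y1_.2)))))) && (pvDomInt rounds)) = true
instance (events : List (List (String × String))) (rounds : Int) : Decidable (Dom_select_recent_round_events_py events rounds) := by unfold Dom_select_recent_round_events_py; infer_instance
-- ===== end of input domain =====

-- B replaces A's reverse scan (accumulate user/assistant events, break at the rounds-th user)
-- by a forward index table of the 'user' events, a computed slice start, and one forward filter
-- (objective: alternative; same return value, neither mutates its argument).

-- ===== PORT A =====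
-- str(event.get("role", "")): on this domain the dict values are strings, so str() is the identity
def pvRole (e : List (String × String)) : String := (PySem.Dict.mk e).getD "role" ""

-- the 'for event in reversed(events)' loop: first list argument is the reversed suffix still to
-- scan, the Int is user_count; returns selected_reversed (breaking = stopping the recursion)
def pvScanA (rounds : Int) : List (List (String × String)) → Int → List (List (String × String))
  | [], _ => []
  | e :: rest, userCount =>
    let role := pvRole e
    if role = "user" ∨ role = "assistant" then
      if role = "user" then
        if rounds ≤ userCount + 1 then [e]
        else e :: pvScanA rounds rest (userCount + 1)
      else e :: pvScanA rounds rest userCount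
    else pvScanA rounds rest userCount

def select_recent_round_events_py (events : List (List (String × String))) (rounds : Int) : List (List (String × String)) :=
  if rounds ≤ 0 then []
  else (pvScanA rounds events.reverse 0).reverse

-- ===== PORT B =====
-- role in ("user", "assistant")
def pvIsChat (e : List (String × String)) : Bool := pvRole e == "user" || pvRole e == "assistant"

def select_recent_round_events_py_alt (events : List (List (String × String))) (rounds : Int) : List (List (String × String)) :=
  if rounds ≤ 0 then []
  else
    let userIdx : List Int := ((PySem.List.enumerate events 0).filter (fun ie => pvRole ie.2 == "user")).map (·.1)
    let start : Int := if rounds ≤ (userIdx.length : Int) then PySem.List.pyGetD userIdx ((userIdx.length : Int) - rounds) 0 else 0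
    (PySem.List.slice events (some start) none).filter pvIsChat

-- ===== PRECONDITION & SPEC =====
def Spec_select_recent_round_events_py (events : List (List (String × String))) (rounds : Int) (out : List (List (String × String))) : Prop := out = select_recent_round_events_py_alt events rounds
instance (events : List (List (String × String))) (rounds : Int) (out : List (List (String × String))) : Decidable (Spec_select_recent_round_events_py events rounds out) := by unfold Spec_select_recent_round_events_py; infer_instance

-- ===== CLAIM (what is proved, stated in full; the proofs are below) =====
def Claim_equal_select_recent_round_events_py : Prop := ∀ (events : List (List (String × String))) (rounds : Int), Dom_select_recent_round_events_py events rounds → Spec_select_recent_round_events_py events rounds (select_recent_round_events_py events rounds)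

-- ===== LEMMAS AND PROOFS =====

-- "role == 'user'" as a Bool predicate
def pvIsU (e : List (String × String)) : Bool := pvRole e == "user"

-- B's user-index table, with an arbitrary enumerate start
def pvUBs (events : List (List (String × String))) (s : Int) : List Int :=
  ((PySem.List.enumerate events s).filter (fun ie => pvRole ie.2 == "user")).map (·.1)

theorem pvUBs_shift (events : List (List (String × String))) (s : Int) :
    pvUBs events s = (pvUBs events 0).map (· + s) := by
  induction events generalizing s with
  | nil => simp [pvUBs, PySem.List.enumerate_nil]
  | cons e rest ih =>
    simp only [pvUBs, PySem.List.enumerate_cons, List.filter_cons]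
    by_cases h : pvRole e = "user" <;>
      simp only [pvUBs] at ih <;>
      simp [h, ih (s+1), ih 1, List.map_map] <;>
      · intro a b _ _; omega

-- B's user-index table as built by the port
def pvUB (events : List (List (String × String))) : List Int :=
  ((PySem.List.enumerate events 0).filter (fun ie => pvRole ie.2 == "user")).map (·.1)

theorem pvUB_cons (e : List (String × String)) (rest : List (List (String × String))) :
    pvUB (e :: rest) = (if pvIsU e then [(0 : Int)] else []) ++ (pvUB rest).map (· + 1) := by
  have h1 := pvUBs_shift rest 1
  simp only [pvUBs] at h1
  by_cases h : pvRole e = "user" <;>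
    simp [pvUB, pvIsU, PySem.List.enumerate_cons, h, h1]

theorem pvUB_length (events : List (List (String × String))) :
    (pvUB events).length = events.countP pvIsU := by
  induction events with
  | nil => simp [pvUB, PySem.List.enumerate_nil]
  | cons e rest ih =>
    rw [pvUB_cons, List.countP_cons]
    by_cases h : pvIsU e <;> simp [h, ih]

theorem pvUB_nonneg (events : List (List (String × String))) :
    ∀ x ∈ pvUB events, 0 ≤ x := by
  induction events with
  | nil => simp [pvUB, PySem.List.enumerate_nil]
  | cons e rest ih =>
    rw [pvUB_cons]
    intro x hx
    rcases List.mem_append.1 hx with hx | hx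
    · by_cases h : pvIsU e <;> simp [h] at hx
      omega
    · rcases List.mem_map.1 hx with ⟨y, hy, rfl⟩
      have := ih y hy; omega

-- A's loop breaks inside r1 (a user there reaches the threshold): r2 is never scanned
theorem pvScanA_break (rounds : Int) (r1 r2 : List (List (String × String))) (uc : Int)
    (h : rounds ≤ uc + (r1.countP pvIsU : Int)) (h1 : 0 < r1.countP pvIsU) :
    pvScanA rounds (r1 ++ r2) uc = pvScanA rounds r1 uc := by
  induction r1 generalizing uc with
  | nil => simp at h1
  | cons e rest ih =>
    rw [List.countP_cons] at h h1
    by_cases hu : pvRole e = "user"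
    · have hcnt : (if pvIsU e then 1 else 0) = 1 := by simp [pvIsU, hu]
      rw [hcnt] at h h1
      by_cases hb : rounds ≤ uc + 1
      · simp [pvScanA, hu, hb]
      · have hrest : 0 < rest.countP pvIsU := by push_cast at h; omega
        simp [pvScanA, hu, hb, ih (uc + 1) (by push_cast at h ⊢; omega) hrest]
    · have hcnt : (if pvIsU e then 1 else 0) = 0 := by simp [pvIsU, hu]
      rw [hcnt] at h h1
      by_cases ha : pvRole e = "assistant" <;>
        simp [pvScanA, hu, ha, ih uc (by push_cast at h ⊢; omega) (by omega)]

theorem pvScanA_singleton (rounds : Int) (e : List (String × String)) (uc : Int) :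
    pvScanA rounds [e] uc = if pvIsChat e then [e] else [] := by
  by_cases hu : pvRole e = "user" <;> by_cases ha : pvRole e = "assistant" <;>
    by_cases hb : rounds ≤ uc + 1 <;> simp [pvScanA, pvIsChat, hu, ha, hb]

-- A's loop never breaks inside r1 (too few users there): r1 is filtered, the scan continues
theorem pvScanA_append_no_break (rounds : Int) (r1 r2 : List (List (String × String))) (uc : Int)
    (h : (r1.countP pvIsU : Int) < rounds - uc) :
    pvScanA rounds (r1 ++ r2) uc = r1.filter pvIsChat ++ pvScanA rounds r2 (uc + (r1.countP pvIsU : Int)) := by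
  induction r1 generalizing uc with
  | nil => simp
  | cons e rest ih =>
    rw [List.countP_cons] at h ⊢
    by_cases hu : pvRole e = "user"
    · have hcnt : (if pvIsU e then 1 else 0) = 1 := by simp [pvIsU, hu]
      rw [hcnt] at h ⊢
      have hnb : ¬ rounds ≤ uc + 1 := by push_cast at h ⊢; omega
      rw [show uc + ((rest.countP pvIsU + 1 : Nat) : Int) = (uc + 1) + (rest.countP pvIsU : Int) by push_cast; omega]
      simp [pvScanA, pvIsChat, hu, hnb, ih (uc + 1) (by push_cast at h ⊢; omega)]
    · have hcnt : (if pvIsU e then 1 else 0) = 0 := by simp [pvIsU, hu]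
      rw [hcnt] at h ⊢
      by_cases ha : pvRole e = "assistant" <;>
        simp [pvScanA, pvIsChat, hu, ha, ih uc (by push_cast at h ⊢; omega)]

-- B's slice start, named for the proofs
def pvStart (events : List (List (String × String))) (rounds : Int) : Int :=
  if rounds ≤ ((pvUB events).length : Int) then PySem.List.pyGetD (pvUB events) (((pvUB events).length : Int) - rounds) 0 else 0

theorem pvStart_nonneg (events : List (List (String × String))) (rounds : Int) (hr : 0 < rounds) :
    0 ≤ pvStart events rounds := by
  unfold pvStart
  by_cases hb : rounds ≤ ((pvUB events).length : Int)
  · set L := (pvUB events).length with hL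
    have hidx : (L : Int) - rounds = ((L - rounds.toNat : Nat) : Int) := by omega
    rw [if_pos hb, hidx, PySem.List.pyGetD_natCast]
    have hk : L - rounds.toNat < L := by omega
    rw [List.getD_eq_getElem?_getD, List.getElem?_eq_getElem hk]
    exact pvUB_nonneg events _ (List.getElem_mem hk)
  · simp [hb]

theorem pvStart_step (e : List (String × String)) (rest : List (List (String × String))) (rounds : Int)
    (hr : 0 < rounds) (hc : rounds ≤ (rest.countP pvIsU : Int)) :
    pvStart (e :: rest) rounds = pvStart rest rounds + 1 := by
  have hL := pvUB_length rest
  set L := (pvUB rest).length with hLdef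
  have hk : ((L : Int) - rounds) = ((L - rounds.toNat : Nat) : Int) := by omega
  set k := L - rounds.toNat with hkdef
  have hkL : k < L := by omega
  have hget : PySem.List.pyGetD (pvUB rest) ((L : Int) - rounds) 0 = (pvUB rest)[k]'hkL := by
    rw [hk, PySem.List.pyGetD_natCast, List.getD_eq_getElem?_getD, List.getElem?_eq_getElem hkL]
    rfl
  unfold pvStart
  rw [pvUB_cons]
  by_cases hu : pvIsU e
  · rw [if_pos hu]
    have hlen : ((([(0:Int)] ++ (pvUB rest).map (· + 1)).length : Nat) : Int) = (L : Int) + 1 := by simp [← hLdef]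
    rw [if_pos (by rw [hlen]; omega), if_pos (by omega)]
    have hidx : ((([(0:Int)] ++ (pvUB rest).map (· + 1)).length : Nat) : Int) - rounds = ((k + 1 : Nat) : Int) := by
      simp [← hLdef]; omega
    rw [hidx, PySem.List.pyGetD_natCast, hget]
    simp [List.getD_eq_getElem?_getD, List.getElem?_map, List.getElem?_eq_getElem hkL]
  · rw [if_neg hu]
    have hlen : (([] ++ (pvUB rest).map (· + 1)).length : Nat) = L := by simp [← hLdef]
    rw [if_pos (by rw [hlen]; omega), if_pos (by omega)]
    have hidx : ((([] ++ (pvUB rest).map (· + 1)).length : Nat) : Int) - rounds = ((k : Nat) : Int) := by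
      simp [← hLdef]; omega
    rw [hidx, PySem.List.pyGetD_natCast, hget]
    simp [List.getD_eq_getElem?_getD, List.getElem?_map, List.getElem?_eq_getElem hkL]

theorem pvStart_zero (e : List (String × String)) (rest : List (List (String × String))) (rounds : Int)
    (hc : (rest.countP pvIsU : Int) < rounds) :
    pvStart (e :: rest) rounds = 0 := by
  have hL := pvUB_length rest
  set L := (pvUB rest).length with hLdef
  unfold pvStart
  rw [pvUB_cons]
  by_cases hu : pvIsU e
  · rw [if_pos hu]
    by_cases hb : rounds ≤ ((([(0:Int)] ++ (pvUB rest).map (· + 1)).length : Nat) : Int)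
    · rw [if_pos hb]
      have hlen : ((([(0:Int)] ++ (pvUB rest).map (· + 1)).length : Nat) : Int) = (L : Int) + 1 := by simp [← hLdef]
      rw [hlen] at hb
      have hidx : ((([(0:Int)] ++ (pvUB rest).map (· + 1)).length : Nat) : Int) - rounds = 0 := by
        rw [hlen]; omega
      rw [hidx]
      rw [List.singleton_append]; exact PySem.List.pyGetD_zero_cons _ _ _
    · rw [if_neg hb]
  · rw [if_neg hu]
    have hlen : ((([] ++ (pvUB rest).map (· + 1)).length : Nat) : Int) = (L : Int) := by simp [← hLdef]
    rw [if_neg (by rw [hlen]; omega)]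

theorem pvAlt_eq (events : List (List (String × String))) (rounds : Int) (hr : 0 < rounds) :
    select_recent_round_events_py_alt events rounds = (PySem.List.slice events (some (pvStart events rounds)) none).filter pvIsChat := by
  rw [select_recent_round_events_py_alt, if_neg (by omega)]
  rfl

theorem pvMain (rounds : Int) (hr : 0 < rounds) (events : List (List (String × String))) :
    (pvScanA rounds events.reverse 0).reverse = (PySem.List.slice events (some (pvStart events rounds)) none).filter pvIsChat := by
  induction events with
  | nil =>
    have h0 : PySem.List.slice ([] : List (List (String × String))) (some (pvStart [] rounds)) none = [] := by
      refine List.eq_nil_iff_forall_not_mem.2 (fun x hx => ?_)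
      exact List.not_mem_nil (PySem.List.mem_of_mem_slice _ _ _ hx)
    rw [List.reverse_nil, h0]
    simp [pvScanA]
  | cons e rest ih =>
    rw [List.reverse_cons]
    by_cases hc : rounds ≤ (rest.countP pvIsU : Int)
    · have hcnt : rest.reverse.countP pvIsU = rest.countP pvIsU := List.countP_reverse
      rw [pvScanA_break rounds rest.reverse [e] 0 (by rw [hcnt]; omega) (by rw [hcnt]; omega), ih,
        pvStart_step e rest rounds hr hc]
      have hs0 : 0 ≤ pvStart rest rounds := pvStart_nonneg rest rounds hr
      rw [PySem.List.slice_from rest hs0, PySem.List.slice_from (e :: rest) (by omega),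
        show (pvStart rest rounds + 1).toNat = (pvStart rest rounds).toNat + 1 by omega,
        List.drop_succ_cons]
    · have hcnt : rest.reverse.countP pvIsU = rest.countP pvIsU := List.countP_reverse
      rw [pvScanA_append_no_break rounds rest.reverse [e] 0 (by rw [hcnt]; omega),
        pvScanA_singleton, pvStart_zero e rest rounds (by omega),
        PySem.List.slice_from (e :: rest) (by omega : (0:Int) ≤ (0:Int))]
      simp [List.filter_reverse, List.filter_cons]
      by_cases hp : pvIsChat e <;> simp [hp]

-- ===== VERDICT (by name: the statement is the Claim_ definition above) =====
theorem select_recent_round_events_py_spec : Claim_equal_select_recent_round_events_py := by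
  intro events rounds _
  unfold Spec_select_recent_round_events_py select_recent_round_events_py
  by_cases hr : rounds ≤ 0
  · simp [hr, select_recent_round_events_py_alt]
  · rw [if_neg hr, pvAlt_eq events rounds (by omega)]
    exact pvMain rounds (by omega) events
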